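-- pv_equiv track=rewrite | github.com/Omer100234/DrafTable | data_collection/clean_draftees_stats.py | get_stat_category
-- ===== SOURCE A (Python) =====
-- SEASON_LABELS = ["Y0", "Y1", "Y2", "Y3"]
--
-- META_SUFFIXES = {"college", "season"}
--
-- def get_stat_category(col):
--     """Extract (season_label, category) from a column name, or None."""
--     for label in SEASON_LABELS:
--         prefix = f"{label}_"
--         if col.startswith(prefix):
--             remainder = col[len(prefix):]
--             if remainder in META_SUFFIXES:
--                 return label, "__meta__"
--             cat = remainder.split("_")[0]
--             return label, cat
--     return None, None
-- ===== SOURCE B (Python) =====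
-- SEASON_LABELS = ["Y0", "Y1", "Y2", "Y3"]
--
-- META_SUFFIXES = {"college", "season"}
--
-- _LABEL_SET = set(SEASON_LABELS)
--
-- def get_stat_category(col):
--     """Extract (season_label, category) from a column name, or None."""
--     label, sep, rest = col.partition("_")
--     if not sep or label not in _LABEL_SET:
--         return None, None
--     if rest in META_SUFFIXES:
--         return label, "__meta__"
--     return label, rest.partition("_")[0]
-- ===== Notes on version B (the rewrite author's own statement) =====
-- stated objective: simpler
-- what changed: Replaces the loop that tries each of the four season labels as a startswith-prefix by a single str.partition at the first underscore followed by one set-membership lookup of the candidate label; the per-label scan disappears and the category is the head of a second partition instead of split()[0].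
import Mathlib
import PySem

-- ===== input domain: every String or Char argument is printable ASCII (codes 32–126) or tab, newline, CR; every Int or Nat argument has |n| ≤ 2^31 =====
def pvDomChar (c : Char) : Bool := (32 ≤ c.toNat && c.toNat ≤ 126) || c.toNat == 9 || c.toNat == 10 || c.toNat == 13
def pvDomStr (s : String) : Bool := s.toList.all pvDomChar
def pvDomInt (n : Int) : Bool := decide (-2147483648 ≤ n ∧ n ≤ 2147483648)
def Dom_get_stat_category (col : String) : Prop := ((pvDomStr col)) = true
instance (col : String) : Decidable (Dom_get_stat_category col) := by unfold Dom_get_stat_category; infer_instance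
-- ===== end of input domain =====

-- B replaces A's per-label startswith loop by one str.partition at the first underscore
-- plus a set-membership lookup of the candidate label (objective: simpler).


-- ===== PORT A =====
def pySEASON_LABELS : List String := ["Y0", "Y1", "Y2", "Y3"]

-- Python set META_SUFFIXES = {"college", "season"}; only membership is used
def pyMETA_SUFFIXES : PySem.Set (List Char) := PySem.Set.ofList ["college".toList, "season".toList]

-- the 'for label in SEASON_LABELS' loop with early return
def getA_go : List String → List Char → Option String × Option String
  | [], _ => (none, none)
  | label :: labels, s =>
    let pre := label.toList ++ ['_']                     -- f"{label}_"
    if PySem.Chars.startswith s pre then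
      let remainder := PySem.Chars.slice s (some (pre.length : Int)) none   -- col[len(prefix):]
      if remainder ∈ pyMETA_SUFFIXES then (some label, some "__meta__")
      else
        -- remainder.split("_")[0]; split on nonempty sep is never empty, so headD is exact
        let cat := ((PySem.Chars.split? remainder ['_']).getD []).headD []
        (some label, some (String.ofList cat))
    else getA_go labels s

def get_stat_category (col : String) : Option String × Option String :=
  getA_go pySEASON_LABELS col.toList

-- ===== PORT B =====
-- hand port of str.partition(sep) for a one-char sep (PySem has no partition); exact:
-- returns (before first sep, sep-found flag, after first sep)
def pyPartition : List Char → Char → List Char × Bool × List Char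
  | [], _ => ([], false, [])
  | c :: cs, sep =>
    if c = sep then ([], true, cs)
    else
      let r := pyPartition cs sep
      (c :: r.1, r.2.1, r.2.2)

def pyLABEL_SET : PySem.Set (List Char) := PySem.Set.ofList (pySEASON_LABELS.map String.toList)

def get_stat_category_alt (col : String) : Option String × Option String :=
  let p := pyPartition col.toList '_'
  if p.2.1 = false ∨ p.1 ∉ pyLABEL_SET then (none, none)
  else if p.2.2 ∈ pyMETA_SUFFIXES then (some (String.ofList p.1), some "__meta__")
  else (some (String.ofList p.1), some (String.ofList (pyPartition p.2.2 '_').1))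

-- ===== PRECONDITION & SPEC =====
def Spec_get_stat_category (col : String) (out : Option String × Option String) : Prop := out = get_stat_category_alt col
instance (col : String) (out : Option String × Option String) : Decidable (Spec_get_stat_category col out) := by unfold Spec_get_stat_category; infer_instance

-- ===== CLAIM (what is proved, stated in full; the proofs are below) =====
def Claim_equal_get_stat_category : Prop := ∀ (col : String), Dom_get_stat_category col → Spec_get_stat_category col (get_stat_category col)

-- ===== LEMMAS AND PROOFS =====

-- pyPartition invariant: the head piece has no separator, and the pieces reassemble the input
theorem pyPartition_inv (sep : Char) : ∀ (l : List Char),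
    sep ∉ (pyPartition l sep).1 ∧
    (if (pyPartition l sep).2.1 then l = (pyPartition l sep).1 ++ sep :: (pyPartition l sep).2.2
     else l = (pyPartition l sep).1) := by
  intro l
  induction l with
  | nil => simp [pyPartition]
  | cons c cs ih =>
    by_cases hc : c = sep
    · simp [pyPartition, hc]
    · rcases ih with ⟨ih1, ih2⟩
      constructor
      · simp only [pyPartition, if_neg hc, List.mem_cons, not_or]
        exact ⟨fun h => hc h.symm, ih1⟩
      · simp only [pyPartition, if_neg hc]
        split_ifs at ih2 ⊢ with hf
        · simpa using ih2
        · simpa using ih2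

-- prefix test against a partitioned list: lab++['_'] is a prefix of h++'_'::r iff lab = h
theorem prefix_part (lab h r : List Char) (hlab : '_' ∉ lab) (hh : '_' ∉ h) :
    List.isPrefixOf (lab ++ ['_']) (h ++ '_' :: r) = decide (lab = h) := by
  induction lab generalizing h with
  | nil =>
    cases h with
    | nil => simp [List.isPrefixOf]
    | cons b h' =>
      have hb : ('_' : Char) ≠ b := fun e => hh (by simp [← e])
      simp [List.isPrefixOf, hb]
  | cons a lab' ih =>
    have ha : a ≠ '_' := fun e => hlab (by simp [e])
    cases h with
    | nil => simp [List.isPrefixOf, ha]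
    | cons b h' =>
      have hh' : '_' ∉ h' := fun e => hh (by simp [e])
      have hlab' : '_' ∉ lab' := fun e => hlab (by simp [e])
      have : ((a == b) && decide (lab' = h')) = (decide (a = b) && decide (lab' = h')) := by
        by_cases hab : a = b <;> simp [hab]
      simp [List.isPrefixOf, ih h' hlab' hh', this]

-- head of Chars.splitOn t ['_'] is the part before the first '_'
theorem splitOn_go_head : ∀ (fuel : Nat) (t cur : List Char) (accs : List (List Char)),
    t.length < fuel →
    ∃ tl, PySem.Chars.splitOn.go ['_'] fuel t cur accs =
      accs.reverse ++ (cur.reverse ++ (pyPartition t '_').1) :: tl := by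
  intro fuel
  induction fuel with
  | zero => intro t cur accs h; omega
  | succ fuel ih =>
    intro t cur accs h
    cases t with
    | nil =>
      refine ⟨[], ?_⟩
      simp [PySem.Chars.splitOn.go, pyPartition]
    | cons c rest =>
      by_cases hc : c = '_'
      · subst hc
        obtain ⟨tl, e⟩ := ih rest [] (cur.reverse :: accs) (by simpa using Nat.lt_of_succ_lt_succ h)
        refine ⟨(pyPartition rest '_').1 :: tl, ?_⟩
        simp only [PySem.Chars.splitOn.go, List.isPrefixOf, beq_self_eq_true, Bool.true_and]
        simp [e, pyPartition]
      · obtain ⟨tl, e⟩ := ih rest (c :: cur) accs (by simpa using Nat.lt_of_succ_lt_succ h)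
        refine ⟨tl, ?_⟩
        have hcb : (('_' : Char) == c) = false := beq_eq_false_iff_ne.mpr (fun h2 => hc h2.symm)
        simp only [PySem.Chars.splitOn.go, List.isPrefixOf, hcb, Bool.false_and, if_neg Bool.false_ne_true]
        simp [e, pyPartition, hc]

theorem splitOn_head (t : List Char) :
    ((PySem.Chars.splitOn t ['_']).head?.getD []) = (pyPartition t '_').1 := by
  obtain ⟨tl, e⟩ := splitOn_go_head (t.length + 1) t [] [] (by omega)
  simp [PySem.Chars.splitOn, e]

-- ===== VERDICT (by name: the statement is the Claim_ definition above) =====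
theorem get_stat_category_spec : Claim_equal_get_stat_category := by
  intro col _
  show get_stat_category col = get_stat_category_alt col
  obtain ⟨h1, h2⟩ := pyPartition_inv '_' col.toList
  rcases hp : pyPartition col.toList '_' with ⟨h, found, r⟩
  rw [hp] at h1 h2
  simp only at h1 h2
  unfold get_stat_category get_stat_category_alt
  rw [hp]
  cases found with
  | false =>
    have hcl : col.toList = h := by simpa using h2
    have hnl : '_' ∉ col.toList := hcl ▸ h1
    have n0 : ¬ (['Y', '0', '_'] <+: col.toList) := fun hq => hnl (hq.subset (by simp))
    have n1 : ¬ (['Y', '1', '_'] <+: col.toList) := fun hq => hnl (hq.subset (by simp))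
    have n2 : ¬ (['Y', '2', '_'] <+: col.toList) := fun hq => hnl (hq.subset (by simp))
    have n3 : ¬ (['Y', '3', '_'] <+: col.toList) := fun hq => hnl (hq.subset (by simp))
    simp [getA_go, pySEASON_LABELS, PySem.Chars.startswith, n0, n1, n2, n3]
  | true =>
    have hcl : col.toList = h ++ '_' :: r := by simpa using h2
    have pp : ∀ lab : List Char, '_' ∉ lab → ((lab ++ ['_']) <+: h ++ '_' :: r ↔ lab = h) := by
      intro lab hlab
      have hb := prefix_part lab h r hlab h1
      constructor
      · intro hpf
        have ht := List.isPrefixOf_iff_prefix.mpr hpf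
        rw [hb] at ht
        exact of_decide_eq_true ht
      · intro e
        refine List.isPrefixOf_iff_prefix.mp ?_
        rw [hb]
        simp [e]
    have e0 : (['Y', '0', '_'] <+: h ++ '_' :: r) ↔ ['Y', '0'] = h := by
      simpa using pp ['Y', '0'] (by decide)
    have e1 : (['Y', '1', '_'] <+: h ++ '_' :: r) ↔ ['Y', '1'] = h := by
      simpa using pp ['Y', '1'] (by decide)
    have e2 : (['Y', '2', '_'] <+: h ++ '_' :: r) ↔ ['Y', '2'] = h := by
      simpa using pp ['Y', '2'] (by decide)
    have e3 : (['Y', '3', '_'] <+: h ++ '_' :: r) ↔ ['Y', '3'] = h := by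
      simpa using pp ['Y', '3'] (by decide)
    rw [hcl]
    by_cases c0 : ['Y', '0'] = h
    · subst c0
      simp [getA_go, pySEASON_LABELS, PySem.Chars.startswith, List.isPrefixOf,
        PySem.Chars.split?, splitOn_head, pyLABEL_SET,
        PySem.List.slice, PySem.List.clampIdx]
    · by_cases c1 : ['Y', '1'] = h
      · subst c1
        simp [getA_go, pySEASON_LABELS, PySem.Chars.startswith, List.isPrefixOf,
          PySem.Chars.split?, splitOn_head, pyLABEL_SET,
          PySem.List.slice, PySem.List.clampIdx]
      · by_cases c2 : ['Y', '2'] = h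
        · subst c2
          simp [getA_go, pySEASON_LABELS, PySem.Chars.startswith, List.isPrefixOf,
            PySem.Chars.split?, splitOn_head, pyLABEL_SET,
            PySem.List.slice, PySem.List.clampIdx]
        · by_cases c3 : ['Y', '3'] = h
          · subst c3
            simp [getA_go, pySEASON_LABELS, PySem.Chars.startswith, List.isPrefixOf,
              PySem.Chars.split?, splitOn_head, pyLABEL_SET,
              PySem.List.slice, PySem.List.clampIdx]
          · simp [getA_go, pySEASON_LABELS, PySem.Chars.startswith, e0, e1, e2, e3,
              c0, c1, c2, c3, pyLABEL_SET]
            intro hx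
            exact absurd (hx (fun e => c0 e.symm) (fun e => c1 e.symm) (fun e => c2 e.symm)).symm c3
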